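-- pv_equiv track=rewrite | github.com/shekhar613/NPTEL-sumsquare | main.py | sumsquare
-- ===== SOURCE A (Python) =====
-- def sumsquare(l):
--     v = [0,0]
--     if len(l)!=0:
--         for i in l:
--             if i%2==0:
--                 v[1]+= i*i
--             else:
--                 v[0]+= i*i
--
--     return v
-- ===== SOURCE B (Python) =====
-- def sumsquare(l):
--     odd = sum(i * i for i in l if i % 2)
--     even = sum(i * i for i in l if i % 2 == 0)
--     return [odd, even]
-- ===== Notes on version B (the rewrite author's own statement) =====
-- stated objective: idiomatic
-- what changed: Replaces the single loop that dispatches each element into a mutable two-slot accumulator with two independent filtered-sum passes (odd squares, even squares) combined at return; the redundant empty-list guard is dropped.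
import Mathlib
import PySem

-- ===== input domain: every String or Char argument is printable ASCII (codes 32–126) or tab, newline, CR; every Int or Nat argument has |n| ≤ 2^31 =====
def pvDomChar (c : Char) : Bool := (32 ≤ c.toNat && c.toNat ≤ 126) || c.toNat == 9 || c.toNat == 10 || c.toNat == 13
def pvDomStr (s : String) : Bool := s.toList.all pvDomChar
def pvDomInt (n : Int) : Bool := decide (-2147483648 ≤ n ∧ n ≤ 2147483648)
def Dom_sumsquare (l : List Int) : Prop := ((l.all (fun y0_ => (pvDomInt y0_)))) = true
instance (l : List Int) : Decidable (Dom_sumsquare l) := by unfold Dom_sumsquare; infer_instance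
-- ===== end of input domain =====

-- ===== PORT A =====
-- A: one loop dispatching each element's square into a two-slot accumulator [odd, even]
def sumsquare (l : List Int) : List Int :=
  let v : Int × Int := (0, 0)
  let v :=
    if l.length ≠ 0 then
      l.foldl (fun v i =>
        if PySem.Int.mod i 2 = 0 then (v.1, v.2 + i * i)
        else (v.1 + i * i, v.2)) v
    else v
  [v.1, v.2]

-- ===== PORT B =====
-- B: two independent filtered-sum passes, no accumulator pair
def sumsquare_alt (l : List Int) : List Int :=
  let odd := ((l.filter (fun i => PySem.Int.mod i 2 ≠ 0)).map (fun i => i * i)).sum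
  let even := ((l.filter (fun i => PySem.Int.mod i 2 = 0)).map (fun i => i * i)).sum
  [odd, even]

-- ===== PRECONDITION & SPEC =====
def Spec_sumsquare (l : List Int) (out : List Int) : Prop := out = sumsquare_alt l
instance (l : List Int) (out : List Int) : Decidable (Spec_sumsquare l out) := by unfold Spec_sumsquare; infer_instance

-- ===== CLAIM (what is proved, stated in full; the proofs are below) =====
def Claim_equal_sumsquare : Prop := ∀ (l : List Int), Dom_sumsquare l → Spec_sumsquare l (sumsquare l)

-- ===== LEMMAS AND PROOFS =====
-- loop invariant: the fold equals the accumulator plus the two filtered sums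
lemma sumsquare_fold (l : List Int) (a b : Int) :
    l.foldl (fun v i =>
        if PySem.Int.mod i 2 = 0 then (v.1, v.2 + i * i)
        else (v.1 + i * i, v.2)) (a, b)
    = (a + ((l.filter (fun i => PySem.Int.mod i 2 ≠ 0)).map (fun i => i * i)).sum,
       b + ((l.filter (fun i => PySem.Int.mod i 2 = 0)).map (fun i => i * i)).sum) := by
  induction l generalizing a b with
  | nil => simp
  | cons x xs ih =>
    rw [List.foldl_cons, List.filter_cons, List.filter_cons]
    by_cases h : PySem.Int.mod x 2 = 0
    · rw [if_pos h, if_neg (by simpa using h), if_pos (by simpa using h), ih]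
      simp only [Prod.mk.injEq, List.map_cons, List.sum_cons]
      refine ⟨?_, ?_⟩ <;> first | trivial | ring
    · rw [if_neg h, if_pos (by simpa using h), if_neg (by simpa using h), ih]
      simp only [Prod.mk.injEq, List.map_cons, List.sum_cons]
      refine ⟨?_, ?_⟩ <;> first | trivial | ring

-- ===== VERDICT (by name: the statement is the Claim_ definition above) =====
theorem sumsquare_spec : Claim_equal_sumsquare := by
  intro l _
  unfold Spec_sumsquare sumsquare sumsquare_alt
  cases l with
  | nil => rfl
  | cons x xs =>
    dsimp only
    rw [if_pos (by simp : ((x :: xs).length ≠ 0)), sumsquare_fold]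
    simp
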